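-- pv_equiv track=rewrite | github.com/CCYellowStar2/astrbot_plugin_rocom_tools | wiki_service.py | extract_keyword_from_message
-- ===== SOURCE A (Python) =====
-- from typing import Iterable, Optional
--
-- def extract_keyword_from_message(message: str, command_names: Iterable[str]) -> str:
--     text = (message or "").strip()
--     if not text:
--         return ""
--
--     without_prefix = text[1:].strip() if text.startswith("/") else text
--     lowered = without_prefix.casefold()
--     for command_name in sorted(command_names, key=len, reverse=True):
--         command_lower = command_name.casefold()
--         if lowered == command_lower:
--             return ""
--         if lowered.startswith(f"{command_lower} "):
--             return without_prefix[len(command_name) :].strip()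
--
--     parts = without_prefix.split(maxsplit=1)
--     if len(parts) == 2:
--         return parts[1].strip()
--     return without_prefix
-- ===== SOURCE B (Python) =====
-- def extract_keyword_from_message(message, command_names):
--     text = (message or "").strip()
--     if not text:
--         return ""
--
--     without_prefix = text[1:].strip() if text.startswith("/") else text
--     lowered = without_prefix.casefold()
--
--     best = None          # longest matching command seen so far
--     best_exact = False   # whether that match was the whole message
--     for command_name in command_names:
--         command_lower = command_name.casefold()
--         if lowered == command_lower:
--             if best is None or len(best) < len(command_name):
--                 best, best_exact = command_name, True
--         elif lowered.startswith(command_lower + " "):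
--             if best is None or len(best) < len(command_name):
--                 best, best_exact = command_name, False
--
--     if best is not None:
--         return "" if best_exact else without_prefix[len(best):].strip()
--
--     parts = without_prefix.split(maxsplit=1)
--     if len(parts) == 2:
--         return parts[1].strip()
--     return without_prefix
-- ===== Notes on version B (the rewrite author's own statement) =====
-- stated objective: simpler
-- what changed: B drops the length-descending sort entirely and makes a single pass over command_names, keeping the longest matching command (and whether it matched exactly), so the loop runs over the original list instead of a sorted copy.
import Mathlib
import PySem

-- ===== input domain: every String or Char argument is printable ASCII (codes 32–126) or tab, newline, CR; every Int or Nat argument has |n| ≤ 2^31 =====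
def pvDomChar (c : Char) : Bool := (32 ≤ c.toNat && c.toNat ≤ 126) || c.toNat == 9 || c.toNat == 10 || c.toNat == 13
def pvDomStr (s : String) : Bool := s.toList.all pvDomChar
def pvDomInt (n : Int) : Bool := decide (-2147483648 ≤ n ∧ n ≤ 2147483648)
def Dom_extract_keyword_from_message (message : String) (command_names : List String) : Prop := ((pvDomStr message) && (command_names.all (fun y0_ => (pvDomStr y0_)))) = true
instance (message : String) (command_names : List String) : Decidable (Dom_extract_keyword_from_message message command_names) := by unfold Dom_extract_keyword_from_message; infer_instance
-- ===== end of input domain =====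

-- B replaces A's sort-then-scan by one pass over the original command list keeping the
-- longest matching command (objective: simpler). Both ports work on code-point lists;
-- Python's str.casefold is ported as PySem.Chars.lower, exact on the ASCII domain.

-- ===== PORT A =====
-- shared tail code of both Pythons: `without_prefix.split(maxsplit=1)` fallback
def pvFallback (without_prefix : List Char) : String :=
  let parts := PySem.Chars.split₀Max without_prefix 1
  if parts.length = 2 then String.ofList (PySem.Chars.strip (parts.getD 1 []))
  else String.ofList without_prefix

-- A's `for command_name in sorted(command_names, key=len, reverse=True)` loop with its two early returns
def pvLoopA (without_prefix lowered : List Char) : List (List Char) → String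
  | [] => pvFallback without_prefix
  | command_name :: rest =>
    let command_lower := PySem.Chars.lower command_name
    if lowered = command_lower then ""
    else if PySem.Chars.startswith lowered (command_lower ++ [' ']) then
      String.ofList (PySem.Chars.strip (PySem.List.slice without_prefix (some (command_name.length : Int)) none))
    else pvLoopA without_prefix lowered rest

def extract_keyword_from_message (message : String) (command_names : List String) : String :=
  let text := PySem.Chars.strip message.toList
  if text = [] then ""
  else
    let without_prefix :=
      if PySem.Chars.startswith text ['/'] then PySem.Chars.strip (PySem.List.slice text (some 1) none)
      else text
    let lowered := PySem.Chars.lower without_prefix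
    pvLoopA without_prefix lowered
      (PySem.List.sorted (command_names.map String.toList) (fun c => (c.length : Int)) true)

-- ===== PORT B =====
-- B's loop body: keep the longest match so far together with whether it was exact
def pvStepB (lowered : List Char) (best : Option (List Char × Bool)) (command_name : List Char) :
    Option (List Char × Bool) :=
  let command_lower := PySem.Chars.lower command_name
  if lowered = command_lower then
    match best with
    | none => some (command_name, true)
    | some (b, e) => if b.length < command_name.length then some (command_name, true) else some (b, e)
  else if PySem.Chars.startswith lowered (command_lower ++ [' ']) then
    match best with
    | none => some (command_name, false)
    | some (b, e) => if b.length < command_name.length then some (command_name, false) else some (b, e)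
  else best

def extract_keyword_from_message_alt (message : String) (command_names : List String) : String :=
  let text := PySem.Chars.strip message.toList
  if text = [] then ""
  else
    let without_prefix :=
      if PySem.Chars.startswith text ['/'] then PySem.Chars.strip (PySem.List.slice text (some 1) none)
      else text
    let lowered := PySem.Chars.lower without_prefix
    match (command_names.map String.toList).foldl (pvStepB lowered) none with
    | some (best, best_exact) =>
        if best_exact then ""
        else String.ofList (PySem.Chars.strip (PySem.List.slice without_prefix (some (best.length : Int)) none))
    | none => pvFallback without_prefix

-- ===== PRECONDITION & SPEC =====
def Spec_extract_keyword_from_message (message : String) (command_names : List String) (out : String) : Prop := out = extract_keyword_from_message_alt message command_names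
instance (message : String) (command_names : List String) (out : String) : Decidable (Spec_extract_keyword_from_message message command_names out) := by unfold Spec_extract_keyword_from_message; infer_instance

-- ===== CLAIM (what is proved, stated in full; the proofs are below) =====
def Claim_equal_extract_keyword_from_message : Prop := ∀ (message : String) (command_names : List String), Dom_extract_keyword_from_message message command_names → Spec_extract_keyword_from_message message command_names (extract_keyword_from_message message command_names)

-- ===== LEMMAS AND PROOFS =====

-- a command matches: the message equals it, or starts with it followed by a space
def pvMatches (lowered c : List Char) : Bool :=
  decide (lowered = PySem.Chars.lower c) || PySem.Chars.startswith lowered (PySem.Chars.lower c ++ [' '])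

-- the value A/B return for a matching command
def pvOut (without_prefix lowered c : List Char) : String :=
  if lowered = PySem.Chars.lower c then ""
  else String.ofList (PySem.Chars.strip (PySem.List.slice without_prefix (some (c.length : Int)) none))

theorem pvLoopA_eq_find? (wp lo : List Char) (l : List (List Char)) :
    pvLoopA wp lo l =
      (match l.find? (pvMatches lo) with
       | some c => pvOut wp lo c
       | none => pvFallback wp) := by
  induction l with
  | nil => rfl
  | cons c rest ih =>
    by_cases h1 : lo = PySem.Chars.lower c
    · simp [pvLoopA, List.find?, pvMatches, pvOut, h1]
    · by_cases h2 : PySem.Chars.startswith lo (PySem.Chars.lower c ++ [' ']) = true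
      · simp [pvLoopA, List.find?, pvMatches, pvOut, h1, h2]
      · simp [pvLoopA, List.find?, pvMatches, h1, h2, ih]

theorem pvLen_of_exact {lo c : List Char} (h : lo = PySem.Chars.lower c) :
    lo.length = c.length := by
  subst h; simp [PySem.Chars.lower]

theorem pvLen_of_prefix {lo c : List Char}
    (h : PySem.Chars.startswith lo (PySem.Chars.lower c ++ [' ']) = true) :
    c.length < lo.length := by
  have := (PySem.Chars.startswith_iff lo (PySem.Chars.lower c ++ [' '])).mp h
  have hle := this.length_le
  simp [PySem.Chars.lower] at hle
  omega

-- two matching commands of the same length yield the same return value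
theorem pvOut_congr {lo c c' : List Char} (wp : List Char)
    (hc : pvMatches lo c = true) (hc' : pvMatches lo c' = true)
    (hlen : c.length = c'.length) : pvOut wp lo c = pvOut wp lo c' := by
  simp only [pvMatches, Bool.or_eq_true, decide_eq_true_eq] at hc hc'
  unfold pvOut
  by_cases h1 : lo = PySem.Chars.lower c <;> by_cases h3 : lo = PySem.Chars.lower c'
  · rw [if_pos h1, if_pos h3]
  · exfalso
    have h2 : PySem.Chars.startswith lo (PySem.Chars.lower c' ++ [' ']) = true := by
      rcases hc' with h | h
      · exact absurd h h3
      · exact h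
    have := pvLen_of_exact h1
    have := pvLen_of_prefix h2
    omega
  · exfalso
    have h2 : PySem.Chars.startswith lo (PySem.Chars.lower c ++ [' ']) = true := by
      rcases hc with h | h
      · exact absurd h h1
      · exact h
    have := pvLen_of_exact h3
    have := pvLen_of_prefix h2
    omega
  · rw [if_neg h1, if_neg h3, hlen]

-- === rewrite rules for B's step function ===

theorem pvStepB_exact {lo x : List Char} (acc : Option (List Char × Bool))
    (h1 : lo = PySem.Chars.lower x) :
    pvStepB lo acc x =
      (match acc with
       | none => some (x, true)
       | some (b, e) => if b.length < x.length then some (x, true) else some (b, e)) := by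
  simp only [pvStepB]; rw [if_pos h1]

theorem pvStepB_prefix {lo x : List Char} (acc : Option (List Char × Bool))
    (h1 : ¬ lo = PySem.Chars.lower x)
    (h2 : PySem.Chars.startswith lo (PySem.Chars.lower x ++ [' ']) = true) :
    pvStepB lo acc x =
      (match acc with
       | none => some (x, false)
       | some (b, e) => if b.length < x.length then some (x, false) else some (b, e)) := by
  simp only [pvStepB]; rw [if_neg h1, if_pos h2]

theorem pvStepB_skip {lo x : List Char} (acc : Option (List Char × Bool))
    (h1 : ¬ lo = PySem.Chars.lower x)
    (h2 : ¬ PySem.Chars.startswith lo (PySem.Chars.lower x ++ [' ']) = true) :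
    pvStepB lo acc x = acc := by
  simp only [pvStepB]; rw [if_neg h1, if_neg h2]

-- === B's fold: emptiness, monotonicity, soundness, maximality ===

theorem pvFoldB_eq_none (lo : List Char) (l : List (List Char)) (acc : Option (List Char × Bool)) :
    l.foldl (pvStepB lo) acc = none ↔ acc = none ∧ ∀ c ∈ l, pvMatches lo c = false := by
  induction l generalizing acc with
  | nil => simp
  | cons x t ih =>
    constructor
    · intro h
      rw [List.foldl_cons] at h
      by_cases h1 : lo = PySem.Chars.lower x
      · exfalso
        rw [pvStepB_exact acc h1] at h
        rcases acc with _ | ⟨b, e⟩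
        · rcases (ih _).mp h with ⟨habs, -⟩; simp at habs
        · simp only at h
          split at h <;> rcases (ih _).mp h with ⟨habs, -⟩ <;> simp at habs
      · by_cases h2 : PySem.Chars.startswith lo (PySem.Chars.lower x ++ [' ']) = true
        · exfalso
          rw [pvStepB_prefix acc h1 h2] at h
          rcases acc with _ | ⟨b, e⟩
          · rcases (ih _).mp h with ⟨habs, -⟩; simp at habs
          · simp only at h
            split at h <;> rcases (ih _).mp h with ⟨habs, -⟩ <;> simp at habs
        · rw [pvStepB_skip acc h1 h2] at h
          rcases (ih _).mp h with ⟨ha, hall⟩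
          refine ⟨ha, ?_⟩
          intro c hc
          rcases List.mem_cons.mp hc with rfl | hc
          · simp [pvMatches, h1, h2]
          · exact hall c hc
    · rintro ⟨rfl, hall⟩
      rw [List.foldl_cons]
      have hx := hall x (List.mem_cons_self)
      simp only [pvMatches, Bool.or_eq_false_iff, decide_eq_false_iff_not] at hx
      rw [pvStepB_skip none hx.1 (by simp [hx.2])]
      exact (ih none).mpr ⟨rfl, fun c hc => hall c (List.mem_cons_of_mem _ hc)⟩

theorem pvFoldB_le (lo : List Char) (l : List (List Char)) :
    ∀ (p q : List Char × Bool), l.foldl (pvStepB lo) (some p) = some q →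
      p.1.length ≤ q.1.length := by
  induction l with
  | nil => intro p q h; simp at h; subst h; exact le_refl _
  | cons x t ih =>
    intro p q h
    rw [List.foldl_cons] at h
    rcases p with ⟨b, e⟩
    by_cases h1 : lo = PySem.Chars.lower x
    · rw [pvStepB_exact _ h1] at h
      simp only at h
      by_cases hlt : b.length < x.length
      · rw [if_pos hlt] at h
        have := ih (x, true) q h
        simp only at this ⊢
        omega
      · rw [if_neg hlt] at h
        exact ih _ _ h
    · by_cases h2 : PySem.Chars.startswith lo (PySem.Chars.lower x ++ [' ']) = true
      · rw [pvStepB_prefix _ h1 h2] at h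
        simp only at h
        by_cases hlt : b.length < x.length
        · rw [if_pos hlt] at h
          have := ih (x, false) q h
          simp only at this ⊢
          omega
        · rw [if_neg hlt] at h
          exact ih _ _ h
      · rw [pvStepB_skip _ h1 h2] at h
        exact ih _ _ h

theorem pvFoldB_sound (lo : List Char) (l : List (List Char)) :
    ∀ (acc : Option (List Char × Bool)) (b : List Char) (e : Bool),
      l.foldl (pvStepB lo) acc = some (b, e) →
      acc = some (b, e) ∨
        (b ∈ l ∧ pvMatches lo b = true ∧ e = decide (lo = PySem.Chars.lower b)) := by
  induction l with
  | nil => intro acc b e h; simp at h; exact Or.inl h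
  | cons x t ih =>
    intro acc b e h
    rw [List.foldl_cons] at h
    rcases ih _ _ _ h with hacc | ⟨hmem, hm, he⟩
    · -- the step at x produced the accumulator passed to the tail
      by_cases h1 : lo = PySem.Chars.lower x
      · rw [pvStepB_exact acc h1] at hacc
        rcases acc with _ | ⟨p, pe⟩
        · simp only [Option.some.injEq, Prod.mk.injEq] at hacc
          refine Or.inr ⟨by simp [hacc.1], ?_, ?_⟩ <;>
            simp [pvMatches, hacc.2, ← hacc.1, h1]
        · simp only at hacc
          split at hacc
          · simp only [Option.some.injEq, Prod.mk.injEq] at hacc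
            refine Or.inr ⟨by simp [hacc.1], ?_, ?_⟩ <;>
              simp [pvMatches, hacc.2, ← hacc.1, h1]
          · exact Or.inl hacc
      · by_cases h2 : PySem.Chars.startswith lo (PySem.Chars.lower x ++ [' ']) = true
        · rw [pvStepB_prefix acc h1 h2] at hacc
          rcases acc with _ | ⟨p, pe⟩
          · simp only [Option.some.injEq, Prod.mk.injEq] at hacc
            refine Or.inr ⟨by simp [hacc.1], ?_, ?_⟩ <;>
              simp [pvMatches, hacc.2, ← hacc.1, h1, h2]
          · simp only at hacc
            split at hacc
            · simp only [Option.some.injEq, Prod.mk.injEq] at hacc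
              refine Or.inr ⟨by simp [hacc.1], ?_, ?_⟩ <;>
                simp [pvMatches, hacc.2, ← hacc.1, h1, h2]
            · exact Or.inl hacc
        · rw [pvStepB_skip acc h1 h2] at hacc
          exact Or.inl hacc
    · exact Or.inr ⟨List.mem_cons_of_mem _ hmem, hm, he⟩

theorem pvFoldB_max (lo : List Char) (l : List (List Char)) :
    ∀ (acc : Option (List Char × Bool)) (q : List Char × Bool),
      l.foldl (pvStepB lo) acc = some q →
      ∀ c ∈ l, pvMatches lo c = true → c.length ≤ q.1.length := by
  induction l with
  | nil => intro _ _ _ c hc; simp at hc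
  | cons x t ih =>
    intro acc q h c hc hm
    rw [List.foldl_cons] at h
    rcases List.mem_cons.mp hc with rfl | hc
    · -- head: the step at c stores either c itself or a best at least as long
      have hm' := hm
      simp only [pvMatches, Bool.or_eq_true, decide_eq_true_eq] at hm'
      have hstep : ∃ r : List Char × Bool, pvStepB lo acc c = some r ∧ c.length ≤ r.1.length := by
        by_cases h1 : lo = PySem.Chars.lower c
        · rw [pvStepB_exact acc h1]
          rcases acc with _ | ⟨b, e⟩
          · exact ⟨(c, true), rfl, le_refl _⟩
          · by_cases hlt : b.length < c.length
            · exact ⟨(c, true), by simp [hlt], le_refl _⟩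
            · exact ⟨(b, e), by simp [hlt], by show c.length ≤ b.length; omega⟩
        · have h2 : PySem.Chars.startswith lo (PySem.Chars.lower c ++ [' ']) = true := by
            rcases hm' with h | h
            · exact absurd h h1
            · exact h
          rw [pvStepB_prefix acc h1 h2]
          rcases acc with _ | ⟨b, e⟩
          · exact ⟨(c, false), rfl, le_refl _⟩
          · by_cases hlt : b.length < c.length
            · exact ⟨(c, false), by simp [hlt], le_refl _⟩
            · exact ⟨(b, e), by simp [hlt], by show c.length ≤ b.length; omega⟩
      rcases hstep with ⟨r, hr, hcr⟩
      rw [hr] at h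
      have := pvFoldB_le lo t r q h
      omega
    · exact ih _ _ h c hc hm

-- === the sorted list is pairwise length-descending ===

theorem pvInsertBy_pairwise (x : List Char) (l : List (List Char))
    (h : List.Pairwise (fun a b : List Char => b.length ≤ a.length) l) :
    List.Pairwise (fun a b : List Char => b.length ≤ a.length)
      (PySem.List.insertBy (fun a b : List Char => decide ((b.length : Int) < (a.length : Int))) x l) := by
  induction l with
  | nil => simp [PySem.List.insertBy]
  | cons y ys ih =>
    rcases List.pairwise_cons.mp h with ⟨hy, hys⟩
    by_cases hb : ((y.length : Int) < (x.length : Int))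
    · rw [show PySem.List.insertBy (fun a b : List Char => decide ((b.length : Int) < (a.length : Int))) x (y :: ys)
          = x :: y :: ys by simp [PySem.List.insertBy, hb]]
      refine List.pairwise_cons.mpr ⟨?_, h⟩
      intro z hz
      rcases List.mem_cons.mp hz with rfl | hz
      · omega
      · have := hy z hz; omega
    · rw [show PySem.List.insertBy (fun a b : List Char => decide ((b.length : Int) < (a.length : Int))) x (y :: ys)
          = y :: PySem.List.insertBy (fun a b : List Char => decide ((b.length : Int) < (a.length : Int))) x ys
          by simp [PySem.List.insertBy, hb]]
      refine List.pairwise_cons.mpr ⟨?_, ih hys⟩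
      intro z hz
      have hz' := (PySem.List.mem_insertBy _ _ _ _).mp hz
      rcases hz' with rfl | hz'
      · omega
      · exact hy z hz'

theorem pvSorted_pairwise_desc (l : List (List Char)) :
    List.Pairwise (fun a b : List Char => b.length ≤ a.length)
      (PySem.List.sorted l (fun c => (c.length : Int)) true) := by
  rw [PySem.List.sorted_rev_eq_foldl_insertBy]
  have h : ∀ (acc : List (List Char)),
      List.Pairwise (fun a b : List Char => b.length ≤ a.length) acc →
      List.Pairwise (fun a b : List Char => b.length ≤ a.length)
        (l.foldl (fun acc x => PySem.List.insertBy
          (fun a b : List Char => decide ((b.length : Int) < (a.length : Int))) x acc) acc) := by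
    induction l with
    | nil => intro acc h; exact h
    | cons x t ih => intro acc h; exact ih _ (pvInsertBy_pairwise x acc h)
  exact h [] (by simp)

-- find? on a length-descending list returns a longest matching element
theorem pvFind?_max {p : List Char → Bool} {s : List (List Char)} {c : List Char}
    (hs : List.Pairwise (fun a b : List Char => b.length ≤ a.length) s)
    (h : s.find? p = some c) :
    ∀ c' ∈ s, p c' = true → c'.length ≤ c.length := by
  rcases List.find?_eq_some_iff_append.mp h with ⟨hp, as, bs, rfl, hpre⟩
  intro c' hc' hpc'
  rcases List.mem_append.mp hc' with hin | hin
  · have := hpre c' hin; simp [hpc'] at this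
  · rcases List.mem_cons.mp hin with rfl | hin
    · exact le_refl _
    · have hp2 := (List.pairwise_append.mp hs).2.1
      exact (List.pairwise_cons.mp hp2).1 c' hin

-- === the central lemma: A's sorted scan equals B's single-pass fold ===

theorem pvMain (l : List (List Char)) (wp lo : List Char) :
    pvLoopA wp lo (PySem.List.sorted l (fun c => (c.length : Int)) true) =
      (match l.foldl (pvStepB lo) none with
       | some (b, e) =>
           if e then ""
           else String.ofList (PySem.Chars.strip (PySem.List.slice wp (some (b.length : Int)) none))
       | none => pvFallback wp) := by
  have hperm := PySem.List.sorted_perm l (fun c => (c.length : Int)) true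
  rw [pvLoopA_eq_find?]
  cases hf : (PySem.List.sorted l (fun c => (c.length : Int)) true).find? (pvMatches lo) with
  | none =>
    cases hb : l.foldl (pvStepB lo) none with
    | none => rfl
    | some q =>
      rcases q with ⟨b, e⟩
      rcases pvFoldB_sound lo l none b e hb with h | ⟨hmem, hm, -⟩
      · exact absurd h.symm (by simp)
      · have hbs : b ∈ PySem.List.sorted l (fun c => (c.length : Int)) true := hperm.mem_iff.mpr hmem
        have habs := List.find?_eq_none.mp hf b hbs
        rw [hm] at habs; simp at habs
  | some c =>
    have hmc : pvMatches lo c = true := List.find?_some hf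
    have hcs : c ∈ PySem.List.sorted l (fun c => (c.length : Int)) true := List.mem_of_find?_eq_some hf
    have hcl : c ∈ l := hperm.mem_iff.mp hcs
    cases hb : l.foldl (pvStepB lo) none with
    | none =>
      have habs := ((pvFoldB_eq_none lo l none).mp hb).2 c hcl
      rw [hmc] at habs; simp at habs
    | some q =>
      rcases q with ⟨b, e⟩
      rcases pvFoldB_sound lo l none b e hb with h | ⟨hmem, hmb, he⟩
      · exact absurd h.symm (by simp)
      · have h1 : c.length ≤ b.length := pvFoldB_max lo l none (b, e) hb c hcl hmc
        have h2 : b.length ≤ c.length :=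
          pvFind?_max (pvSorted_pairwise_desc l) hf b (hperm.mem_iff.mpr hmem) hmb
        have hout : pvOut wp lo c = pvOut wp lo b := pvOut_congr wp hmc hmb (by omega)
        show pvOut wp lo c =
          if e = true then ""
          else String.ofList (PySem.Chars.strip (PySem.List.slice wp (some (b.length : Int)) none))
        rw [hout, he]
        unfold pvOut
        by_cases hx : lo = PySem.Chars.lower b <;> simp [hx]

-- ===== VERDICT (by name: the statement is the Claim_ definition above) =====
theorem extract_keyword_from_message_spec : Claim_equal_extract_keyword_from_message := by
  intro message command_names _
  unfold Spec_extract_keyword_from_message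
  unfold extract_keyword_from_message extract_keyword_from_message_alt
  by_cases h : PySem.Chars.strip message.toList = []
  · simp [h]
  · simp only [if_neg h]
    exact pvMain _ _ _
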